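-- pv_equiv track=rewrite | github.com/Dheeraj2444/course-projects | image-orientation-classification/adaboost.py | learner2
-- ===== SOURCE A (Python) =====
-- def learner2(train):
-- 	out = []
-- 	for data in train:
-- 		top, right, bottom, left = sum(data[0:23:3]), sum(data[21:192:24]), \
-- 		sum(data[168:192:3]), sum(data[0:192:24])
-- 		if max([top, right, bottom, left]) == top:
-- 			out.append(180)
-- 		elif max([top, right, bottom, left]) == bottom:
-- 			out.append(0)
-- 		elif max([top, right, bottom, left]) == right:
-- 			out.append(270)
-- 		elif max([top, right, bottom, left]) == left:
-- 			out.append(90)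
-- 	return out
-- ===== SOURCE B (Python) =====
-- def learner2(train):
--     out = []
--     for data in train:
--         # one pass over the pixels: classify each index into the edge rows it belongs to
--         top = bottom = right = left = 0
--         for i, v in enumerate(data):
--             if i % 3 == 0 and i < 23:
--                 top += v
--             if i % 3 == 0 and 168 <= i < 192:
--                 bottom += v
--             if i % 24 == 21 and i < 192:
--                 right += v
--             if i % 24 == 0 and i < 192:
--                 left += v
--         vals = [top, bottom, right, left]
--         best = 0
--         for k in range(1, 4):
--             if vals[best] < vals[k]:
--                 best = k
--         out.append([180, 0, 270, 90][best])
--     return out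
-- ===== Notes on version B (the rewrite author's own statement) =====
-- stated objective: alternative
-- what changed: Replaces the four strided-slice passes per row by a single pass over enumerate(data) that accumulates the four edge sums from index-arithmetic tests, and replaces the if/elif cascade on max() by an explicit argmax-index scan over [top,bottom,right,left] mapped through a label table (first maximum wins, as in the elif order).
import Mathlib
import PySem

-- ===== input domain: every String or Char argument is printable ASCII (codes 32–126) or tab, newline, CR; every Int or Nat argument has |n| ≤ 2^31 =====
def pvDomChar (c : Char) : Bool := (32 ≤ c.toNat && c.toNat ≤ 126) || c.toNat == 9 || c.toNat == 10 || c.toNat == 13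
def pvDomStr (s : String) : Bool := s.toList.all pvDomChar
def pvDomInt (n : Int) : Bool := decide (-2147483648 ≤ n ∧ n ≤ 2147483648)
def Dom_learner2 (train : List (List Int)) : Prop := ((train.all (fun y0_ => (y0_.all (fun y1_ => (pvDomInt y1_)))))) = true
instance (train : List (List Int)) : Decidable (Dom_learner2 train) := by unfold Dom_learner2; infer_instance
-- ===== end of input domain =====

-- B replaces the four strided-slice passes per row by ONE pass over enumerate(data) accumulating the
-- four edge sums from index tests, and the if/elif cascade by an argmax-index scan over a value table
-- (objective: alternative decomposition, same asymptotic cost).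

-- ===== PORT A =====
-- transliteration of A: per row, four strided slice sums then the if/elif cascade on max([top, right, bottom, left])
def learner2 (train : List (List Int)) : List Int :=
  train.foldl (fun out data =>
    let top := ((PySem.List.slice? data (some 0) (some 23) 3).getD []).sum
    let right := ((PySem.List.slice? data (some 21) (some 192) 24).getD []).sum
    let bottom := ((PySem.List.slice? data (some 168) (some 192) 3).getD []).sum
    let left := ((PySem.List.slice? data (some 0) (some 192) 24).getD []).sum
    let m := (PySem.List.max? [top, right, bottom, left] (fun x => x)).getD 0
    if m = top then out ++ [180]
    else if m = bottom then out ++ [0]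
    else if m = right then out ++ [270]
    else if m = left then out ++ [90]
    else out) []

-- ===== PORT B =====
-- transliteration of B: one pass over enumerate(data) builds (top, bottom, right, left); then an
-- explicit best-index loop over range(1, 4) and a label-table lookup.
def learner2_alt (train : List (List Int)) : List Int :=
  train.foldl (fun out data =>
    let s := (PySem.List.enumerate data).foldl (fun s p =>
      (if PySem.Int.mod p.1 3 = 0 ∧ p.1 < 23 then s.1 + p.2 else s.1,
       if PySem.Int.mod p.1 3 = 0 ∧ 168 ≤ p.1 ∧ p.1 < 192 then s.2.1 + p.2 else s.2.1,
       if PySem.Int.mod p.1 24 = 21 ∧ p.1 < 192 then s.2.2.1 + p.2 else s.2.2.1,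
       if PySem.Int.mod p.1 24 = 0 ∧ p.1 < 192 then s.2.2.2 + p.2 else s.2.2.2)) (0, 0, 0, 0)
    let vals : List Int := [s.1, s.2.1, s.2.2.1, s.2.2.2]
    let best := (PySem.List.pyRange 1 4 1).foldl (fun best k =>
      if PySem.List.pyGetD vals best 0 < PySem.List.pyGetD vals k 0 then k else best) (0 : Int)
    out ++ [PySem.List.pyGetD [180, 0, 270, 90] best 0]) []

-- ===== PRECONDITION & SPEC =====
def Spec_learner2 (train : List (List Int)) (out : List Int) : Prop := out = learner2_alt train
instance (train : List (List Int)) (out : List Int) : Decidable (Spec_learner2 train out) := by unfold Spec_learner2; infer_instance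

-- ===== CLAIM (what is proved, stated in full; the proofs are below) =====
def Claim_equal_learner2 : Prop := ∀ (train : List (List Int)), Dom_learner2 train → Spec_learner2 train (learner2 train)

-- ===== LEMMAS AND PROOFS =====

-- sum of the second components of the pairs of l whose index satisfies c
def pvSP (l : List (Int × Int)) (c : Int → Prop) [DecidablePred c] : Int :=
  ((l.filter (fun p => decide (c p.1))).map Prod.snd).sum

-- sum of xs over the indices of [0, len xs) that satisfy c
def pvSumIdx (xs : List Int) (c : Int → Prop) [DecidablePred c] : Int :=
  (((PySem.List.pyRange 0 (xs.length : Int) 1).filter (fun i => decide (c i))).map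
    (fun i => PySem.List.pyGetD xs i 0)).sum

-- B's one-pass fold computes the four conditional sums at once
lemma pvFold4 (c1 c2 c3 c4 : Int → Prop) [DecidablePred c1] [DecidablePred c2]
    [DecidablePred c3] [DecidablePred c4] :
    ∀ (l : List (Int × Int)) (s : Int × Int × Int × Int),
      l.foldl (fun s p =>
        (if c1 p.1 then s.1 + p.2 else s.1,
         if c2 p.1 then s.2.1 + p.2 else s.2.1,
         if c3 p.1 then s.2.2.1 + p.2 else s.2.2.1,
         if c4 p.1 then s.2.2.2 + p.2 else s.2.2.2)) s
      = (s.1 + pvSP l c1, s.2.1 + pvSP l c2, s.2.2.1 + pvSP l c3, s.2.2.2 + pvSP l c4) := by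
  intro l
  induction l with
  | nil => intro s; simp [pvSP]
  | cons p t ih =>
    intro s
    simp only [List.foldl_cons, ih, pvSP, List.filter_cons]
    by_cases h1 : c1 p.1 <;> by_cases h2 : c2 p.1 <;> by_cases h3 : c3 p.1 <;> by_cases h4 : c4 p.1 <;>
      simp [h1, h2, h3, h4, Prod.ext_iff] <;> omega

lemma pvSP_enumerate (xs : List Int) (c : Int → Prop) [DecidablePred c] :
    pvSP (PySem.List.enumerate xs) c = pvSumIdx xs c := by
  rw [pvSP, pvSumIdx, PySem.List.enumerate_eq_map_pyRange xs 0]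
  simp [List.filter_map, List.map_map, Function.comp_def, PySem.List.len]

-- a list of in-range indices mapped through xs[i]? keeps every element
lemma pvFilterMapGet (xs : List Int) :
    ∀ (l : List Int), (∀ i ∈ l, 0 ≤ i ∧ i < (xs.length : Int)) →
      l.filterMap (fun i => xs[i.toNat]?) = l.map (fun i => PySem.List.pyGetD xs i 0) := by
  intro l
  induction l with
  | nil => intro _; simp
  | cons i t ih =>
    intro h
    have hi := h i (by simp)
    have hlt : i.toNat < xs.length := by omega
    rw [List.filterMap_cons, List.map_cons, ih (fun j hj => h j (by simp [hj]))]
    rw [List.getElem?_eq_getElem hlt, PySem.List.pyGetD_of_nonneg xs 0 hi.1,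
      List.getD_eq_getElem?_getD, List.getElem?_eq_getElem hlt]
    rfl

-- a positive-step slice is the map of the element lookup over the clamped pyRange
lemma pvSlicePos (xs : List Int) (a b st : Int) (hst : 0 < st) (ha : 0 ≤ a) (hb : 0 ≤ b) :
    (PySem.List.slice? xs (some a) (some b) st).getD []
      = (PySem.List.pyRange (min a (xs.length : Int)) (min b (xs.length : Int)) st).map
          (fun i => PySem.List.pyGetD xs i 0) := by
  have hne : st ≠ 0 := by omega
  have hnlt : ¬ st < 0 := by omega
  rw [PySem.List.slice?, PySem.List.sliceIndices]
  simp only [if_neg hne, if_neg hnlt, if_neg (by omega : ¬ a < 0), if_neg (by omega : ¬ b < 0),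
    if_pos hst, Option.getD_some]
  have hcomp : (fun (k : Nat) => xs[((min a (xs.length : Int)) + st * (k : Int)).toNat]?)
      = (fun (i : Int) => xs[i.toNat]?) ∘ (fun (k : Nat) => (min a (xs.length : Int)) + st * (k : Int)) := rfl
  rw [PySem.List.pyRange_of_pos _ _ hst, List.map_map, hcomp, ← List.filterMap_map]
  have hmem : ∀ i ∈ PySem.List.pyRange (min a (xs.length : Int)) (min b (xs.length : Int)) st,
      0 ≤ i ∧ i < (xs.length : Int) := by
    intro i hi
    rw [PySem.List.mem_pyRange_iff_of_pos hst] at hi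
    omega
  rw [PySem.List.pyRange_of_pos _ _ hst] at hmem
  rw [← List.map_map]
  exact pvFilterMapGet xs _ hmem

lemma pvRangePosPairwise (a b st : Int) (hst : 0 < st) :
    (PySem.List.pyRange a b st).Pairwise (· < ·) := by
  rw [PySem.List.pyRange_of_pos _ _ hst]
  refine List.Pairwise.map _ ?_ (List.pairwise_lt_range)
  intro k k' hkk'
  have : st * (k : Int) < st * (k' : Int) := by
    apply mul_lt_mul_of_pos_left (by exact_mod_cast hkk') hst
  omega

-- the filtered full index range coincides with the clamped strided range
lemma pvIdxSet (len a b st : Int) (hst : 0 < st) (c : Int → Prop) [DecidablePred c]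
    (hc : ∀ i, (0 ≤ i ∧ i < len ∧ c i) ↔
      (min a len ≤ i ∧ i < min b len ∧ st ∣ i - min a len)) :
    (PySem.List.pyRange 0 len 1).filter (fun i => decide (c i))
      = PySem.List.pyRange (min a len) (min b len) st := by
  have h1 : ((PySem.List.pyRange 0 len 1).filter (fun i => decide (c i))).Pairwise (· < ·) :=
    List.Pairwise.filter _ (PySem.List.pairwise_lt_pyRange_one 0 len)
  have h2 := pvRangePosPairwise (min a len) (min b len) st hst
  have hmem : ∀ x, x ∈ (PySem.List.pyRange 0 len 1).filter (fun i => decide (c i)) ↔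
      x ∈ PySem.List.pyRange (min a len) (min b len) st := by
    intro x
    rw [List.mem_filter, PySem.List.mem_pyRange_one, PySem.List.mem_pyRange_iff_of_pos hst,
      decide_eq_true_iff, and_assoc]
    exact hc x
  have hperm : ((PySem.List.pyRange 0 len 1).filter (fun i => decide (c i))).Perm
      (PySem.List.pyRange (min a len) (min b len) st) := by
    refine (List.perm_ext_iff_of_nodup ?_ ?_).mpr hmem
    · exact List.Nodup.filter _ (PySem.List.nodup_pyRange_one 0 len)
    · exact h2.imp (fun h => ne_of_lt h)
  exact hperm.eq_of_pairwise (fun x y _ _ hxy hyx => absurd hyx (lt_asymm hxy)) h1 h2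

-- the selection: A's cascade on max([t,r,b,l]) picks the same label as B's best-index scan
lemma pvFoldOpt {α : Type} (key : α → Int) : ∀ (xs : List α) (m : α),
    List.foldl (fun acc x => match acc with
      | none => some x
      | some m => if key m < key x then some x else some m) (some m) xs
    = some (List.foldl (fun m x => if key m < key x then x else m) m xs) := by
  intro xs
  induction xs with
  | nil => intro m; rfl
  | cons x t ih =>
    intro m
    by_cases h : key m < key x <;> simp [List.foldl, h, ih]

lemma pvMax?Cons {α : Type} (key : α → Int) (a : α) (xs : List α) :
    PySem.List.max? (a :: xs) key
      = some (xs.foldl (fun m x => if key m < key x then x else m) a) := by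
  simp only [PySem.List.max?, List.foldl]
  exact pvFoldOpt key xs a

set_option maxHeartbeats 1600000 in
lemma pvPick (out : List Int) (t b r l : Int) :
    (let m := (PySem.List.max? [t, r, b, l] (fun x => x)).getD 0
     if m = t then out ++ [180]
     else if m = b then out ++ [0]
     else if m = r then out ++ [270]
     else if m = l then out ++ [90]
     else out) =
    (let vals : List Int := [t, b, r, l]
     let best := (PySem.List.pyRange 1 4 1).foldl (fun best k =>
       if PySem.List.pyGetD vals best 0 < PySem.List.pyGetD vals k 0 then k else best) (0 : Int)
     out ++ [PySem.List.pyGetD [180, 0, 270, 90] best 0]) := by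
  rw [pvMax?Cons]
  rw [show PySem.List.pyRange 1 4 1 = [1, 2, 3] from by decide]
  simp only [List.foldl_cons, List.foldl_nil, Option.getD_some]
  have g0 : PySem.List.pyGetD [t, b, r, l] 0 0 = t := by simp [PySem.List.pyGetD_ofNat']
  have g1 : PySem.List.pyGetD [t, b, r, l] 1 0 = b := by simp [PySem.List.pyGetD_ofNat']
  have g2 : PySem.List.pyGetD [t, b, r, l] 2 0 = r := by simp [PySem.List.pyGetD_ofNat' [t, b, r, l] 2]
  have g3 : PySem.List.pyGetD [t, b, r, l] 3 0 = l := by simp [PySem.List.pyGetD_ofNat' [t, b, r, l] 3]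
  have h0 : PySem.List.pyGetD [(180 : Int), 0, 270, 90] 0 0 = 180 := by simp [PySem.List.pyGetD_ofNat']
  have h1 : PySem.List.pyGetD [(180 : Int), 0, 270, 90] 1 0 = 0 := by simp [PySem.List.pyGetD_ofNat']
  have h2 : PySem.List.pyGetD [(180 : Int), 0, 270, 90] 2 0 = 270 := by simp [PySem.List.pyGetD_ofNat' _ 2]
  have h3 : PySem.List.pyGetD [(180 : Int), 0, 270, 90] 3 0 = 90 := by simp [PySem.List.pyGetD_ofNat' _ 3]
  simp only [g0, g1, g2, g3]
  split_ifs <;> simp_all <;> omega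

-- index-set facts instantiating pvIdxSet for the four slices
lemma pvRowEq (out : List Int) (data : List Int) :
    (let top := ((PySem.List.slice? data (some 0) (some 23) 3).getD []).sum
     let right := ((PySem.List.slice? data (some 21) (some 192) 24).getD []).sum
     let bottom := ((PySem.List.slice? data (some 168) (some 192) 3).getD []).sum
     let left := ((PySem.List.slice? data (some 0) (some 192) 24).getD []).sum
     let m := (PySem.List.max? [top, right, bottom, left] (fun x => x)).getD 0
     if m = top then out ++ [180]
     else if m = bottom then out ++ [0]
     else if m = right then out ++ [270]
     else if m = left then out ++ [90]
     else out) =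
    (let s := (PySem.List.enumerate data).foldl (fun s p =>
       (if PySem.Int.mod p.1 3 = 0 ∧ p.1 < 23 then s.1 + p.2 else s.1,
        if PySem.Int.mod p.1 3 = 0 ∧ 168 ≤ p.1 ∧ p.1 < 192 then s.2.1 + p.2 else s.2.1,
        if PySem.Int.mod p.1 24 = 21 ∧ p.1 < 192 then s.2.2.1 + p.2 else s.2.2.1,
        if PySem.Int.mod p.1 24 = 0 ∧ p.1 < 192 then s.2.2.2 + p.2 else s.2.2.2)) (0, 0, 0, 0)
     let vals : List Int := [s.1, s.2.1, s.2.2.1, s.2.2.2]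
     let best := (PySem.List.pyRange 1 4 1).foldl (fun best k =>
       if PySem.List.pyGetD vals best 0 < PySem.List.pyGetD vals k 0 then k else best) (0 : Int)
     out ++ [PySem.List.pyGetD [180, 0, 270, 90] best 0]) := by
  have hlen : (0 : Int) ≤ (data.length : Int) := by positivity
  -- the one-pass fold yields the four filtered sums
  rw [pvFold4 (fun i => PySem.Int.mod i 3 = 0 ∧ i < 23)
    (fun i => PySem.Int.mod i 3 = 0 ∧ 168 ≤ i ∧ i < 192)
    (fun i => PySem.Int.mod i 24 = 21 ∧ i < 192)
    (fun i => PySem.Int.mod i 24 = 0 ∧ i < 192) (PySem.List.enumerate data) (0, 0, 0, 0)]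
  simp only [pvSP_enumerate, zero_add]
  -- each slice sum equals the corresponding filtered sum
  have e1 : ((PySem.List.slice? data (some 0) (some 23) 3).getD []).sum
      = pvSumIdx data (fun i => PySem.Int.mod i 3 = 0 ∧ i < 23) := by
    rw [pvSlicePos data 0 23 3 (by omega) (by omega) (by omega), pvSumIdx,
      pvIdxSet (data.length : Int) 0 23 3 (by omega)]
    intro i
    have := PySem.Int.mod_eq_emod_of_pos (a := i) (b := 3) (by omega)
    rw [this]
    omega
  have e2 : ((PySem.List.slice? data (some 21) (some 192) 24).getD []).sum
      = pvSumIdx data (fun i => PySem.Int.mod i 24 = 21 ∧ i < 192) := by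
    rw [pvSlicePos data 21 192 24 (by omega) (by omega) (by omega), pvSumIdx,
      pvIdxSet (data.length : Int) 21 192 24 (by omega)]
    intro i
    have := PySem.Int.mod_eq_emod_of_pos (a := i) (b := 24) (by omega)
    rw [this]
    omega
  have e3 : ((PySem.List.slice? data (some 168) (some 192) 3).getD []).sum
      = pvSumIdx data (fun i => PySem.Int.mod i 3 = 0 ∧ 168 ≤ i ∧ i < 192) := by
    rw [pvSlicePos data 168 192 3 (by omega) (by omega) (by omega), pvSumIdx,
      pvIdxSet (data.length : Int) 168 192 3 (by omega)]
    intro i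
    have := PySem.Int.mod_eq_emod_of_pos (a := i) (b := 3) (by omega)
    rw [this]
    omega
  have e4 : ((PySem.List.slice? data (some 0) (some 192) 24).getD []).sum
      = pvSumIdx data (fun i => PySem.Int.mod i 24 = 0 ∧ i < 192) := by
    rw [pvSlicePos data 0 192 24 (by omega) (by omega) (by omega), pvSumIdx,
      pvIdxSet (data.length : Int) 0 192 24 (by omega)]
    intro i
    have := PySem.Int.mod_eq_emod_of_pos (a := i) (b := 24) (by omega)
    rw [this]
    omega
  rw [e1, e2, e3, e4]
  exact pvPick out _ _ _ _

-- ===== VERDICT (by name: the statement is the Claim_ definition above) =====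
theorem learner2_spec : Claim_equal_learner2 := by
  intro train _
  unfold Spec_learner2 learner2 learner2_alt
  congr 1
  funext out data
  exact pvRowEq out data
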